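-- pv_equiv track=rewrite | github.com/zfifteen/prime-gap-structure | experiments/rule_x_logic_engine/run_logic_engine.py | chamber_carrier
-- ===== SOURCE A (Python) =====
-- import math
--
-- def is_prime(n: int) -> bool:
--     if n < 2:
--         return False
--     if n in (2, 3):
--         return True
--     if n % 2 == 0 or n % 3 == 0:
--         return False
--     limit = math.isqrt(n)
--     factor = 5
--     while factor <= limit:
--         if n % factor == 0 or n % (factor + 2) == 0:
--             return False
--         factor += 6
--     return True
--
-- def divisor_count(n: int) -> int:
--     remaining = n
--     total = 1
--     factor = 2
--     while factor * factor <= remaining: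
--         if remaining % factor == 0:
--             exponent = 0
--             while remaining % factor == 0:
--                 remaining //= factor
--                 exponent += 1
--             total *= exponent + 1
--         factor += 1 if factor == 2 else 2
--     if remaining > 1:
--         total *= 2
--     return total
--
-- def chamber_carrier(anchor_p: int, offset: int) -> dict[str, int | None]:
--     composites: list[tuple[int, int]] = []
--     for n in range(anchor_p + 1, anchor_p + offset):
--         if not is_prime(n):
--             composites.append((n, divisor_count(n)))
--     if not composites:
--         return {
--             "carrier": None,
--             "carrier_offset": None,
--             "carrier_d": None,
--             "post_carrier_lower_d_count": 0,
--             "post_carrier_ge_d_count": 0,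
--         }
--     carrier, carrier_d = min(composites, key=lambda item: (item[1], item[0]))
--     post = [(n, d) for n, d in composites if n > carrier]
--     return {
--         "carrier": carrier,
--         "carrier_offset": carrier - anchor_p,
--         "carrier_d": carrier_d,
--         "post_carrier_lower_d_count": sum(1 for _, d in post if d < carrier_d),
--         "post_carrier_ge_d_count": sum(1 for _, d in post if d >= carrier_d),
--     }
-- ===== SOURCE B (Python) =====
-- def _dcount(n: int) -> int:
--     # divisor count by one full trial-division factorization:
--     # the factor 2 is stripped first, then only odd candidates are tried.
--     m = n
--     total = 1
--     e = 0
--     while m % 2 == 0 and m > 1: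
--         m //= 2
--         e += 1
--     total *= e + 1
--     p = 3
--     while p * p <= m:
--         if m % p:
--             p += 2
--         else:
--             e = 0
--             while m % p == 0:
--                 m //= p
--                 e += 1
--             total *= e + 1
--     if m > 1:
--         total *= 2
--     return total
--
--
-- def chamber_carrier(anchor_p: int, offset: int) -> dict[str, int | None]:
--     # One pass: each n is factorized once (prime iff its divisor count is 2),
--     # the carrier (min by (d, n)) and the post-carrier tally are maintained on
--     # the fly.  Since the carrier has the minimal divisor count, no later
--     # composite can have a smaller one, so post_carrier_lower_d_count is 0.
--     carrier = None
--     carrier_d = None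
--     ge = 0
--     for n in range(anchor_p + 1, anchor_p + offset):
--         d = _dcount(n)
--         if n >= 2 and d == 2:
--             continue  # prime
--         if carrier is None or d < carrier_d:
--             carrier, carrier_d, ge = n, d, 0
--         else:
--             ge += 1
--     if carrier is None:
--         return {
--             "carrier": None,
--             "carrier_offset": None,
--             "carrier_d": None,
--             "post_carrier_lower_d_count": 0,
--             "post_carrier_ge_d_count": 0,
--         }
--     return {
--         "carrier": carrier,
--         "carrier_offset": carrier - anchor_p,
--         "carrier_d": carrier_d,
--         "post_carrier_lower_d_count": 0,
--         "post_carrier_ge_d_count": ge,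
--     }
-- ===== Notes on version B (the rewrite author's own statement) =====
-- stated objective: alternative
-- what changed: B replaces A's per-number double scan (a 6k±1 primality test plus a separate divisor-count factorization) by one trial-division factorization per number (prime iff its divisor count is 2), and replaces A's build-list/min-with-key/filter/two-sums pipeline by a single fold that maintains the carrier and the post-carrier tally on the fly (the lower-d count is provably always 0 since the carrier has minimal divisor count).
import Mathlib
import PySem

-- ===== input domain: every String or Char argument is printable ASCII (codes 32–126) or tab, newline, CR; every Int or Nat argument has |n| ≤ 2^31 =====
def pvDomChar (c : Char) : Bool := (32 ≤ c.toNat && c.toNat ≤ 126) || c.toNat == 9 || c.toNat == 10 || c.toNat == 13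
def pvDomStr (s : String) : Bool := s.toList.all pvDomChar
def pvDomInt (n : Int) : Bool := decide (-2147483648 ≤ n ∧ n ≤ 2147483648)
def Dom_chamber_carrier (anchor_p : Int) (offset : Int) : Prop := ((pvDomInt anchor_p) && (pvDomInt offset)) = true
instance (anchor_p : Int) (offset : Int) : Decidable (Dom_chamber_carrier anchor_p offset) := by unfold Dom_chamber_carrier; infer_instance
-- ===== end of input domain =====

-- B re-implements chamber_carrier with one factorization per n (prime iff divisor count 2)
-- and a single-pass fold instead of list building + min + filter + two sums; same results, similar cost.
-- The while-loops are ported as fuel recursion; every top-level call supplies enough fuel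
-- (proved by the spec lemmas below), so the fuel-0 branch is never taken.

-- ===== PORT A =====
-- port of math.isqrt (exact: only applied to n ≥ 2)
def pvIsqrt (n : Int) : Int := Int.ofNat (Nat.sqrt n.toNat)

-- the `while factor <= limit` loop of is_prime
def isPrimeLoop : Nat → Int → Int → Int → Bool
  | 0, _, _, _ => true
  | fuel + 1, n, limit, factor =>
    if factor ≤ limit then
      if PySem.Int.mod n factor = 0 ∨ PySem.Int.mod n (factor + 2) = 0 then false
      else isPrimeLoop fuel n limit (factor + 6)
    else true

def pyIsPrime (n : Int) : Bool :=
  if n < 2 then false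
  else if n = 2 ∨ n = 3 then true
  else if PySem.Int.mod n 2 = 0 ∨ PySem.Int.mod n 3 = 0 then false
  else isPrimeLoop ((pvIsqrt n + 1 - 5).toNat + 1) n (pvIsqrt n) 5

-- the inner `while remaining % factor == 0` loop of divisor_count; the guards 2 ≤ factor,
-- 0 < remaining only make it total (they hold at every reachable call)
def extractLoop : Nat → Int → Int → Int → Int × Int
  | 0, remaining, _, exponent => (remaining, exponent)
  | fuel + 1, remaining, factor, exponent =>
    if 2 ≤ factor ∧ 0 < remaining ∧ PySem.Int.mod remaining factor = 0 then
      extractLoop fuel (PySem.Int.floordiv remaining factor) factor (exponent + 1)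
    else (remaining, exponent)

-- the outer `while factor * factor <= remaining` loop of divisor_count
def divCountLoop : Nat → Int → Int → Int → Int
  | 0, _, _, total => total
  | fuel + 1, remaining, factor, total =>
    if 2 ≤ factor ∧ factor * factor ≤ remaining then
      if PySem.Int.mod remaining factor = 0 then
        divCountLoop fuel (extractLoop remaining.toNat remaining factor 0).1
          (factor + if factor = 2 then 1 else 2)
          (total * ((extractLoop remaining.toNat remaining factor 0).2 + 1))
      else divCountLoop fuel remaining (factor + if factor = 2 then 1 else 2) total
    else if 1 < remaining then total * 2 else total

def pyDivisorCount (n : Int) : Int := divCountLoop ((2 * n - 2).toNat + 1) n 2 1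

def chamber_carrier (anchor_p : Int) (offset : Int) : List (String × Option Int) :=
  let composites := (PySem.List.pyRange (anchor_p + 1) (anchor_p + offset) 1).foldl
    (fun acc n => if !pyIsPrime n then acc ++ [(n, pyDivisorCount n)] else acc) []
  if composites.isEmpty then
    [("carrier", none), ("carrier_offset", none), ("carrier_d", none),
     ("post_carrier_lower_d_count", some 0), ("post_carrier_ge_d_count", some 0)]
  else
    match PySem.List.min2? composites (fun it => it.2) (fun it => it.1) with
    | none => []   -- unreachable: composites is nonempty
    | some (carrier, carrier_d) =>
      let post := composites.filter (fun nd => carrier < nd.1)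
      [("carrier", some carrier),
       ("carrier_offset", some (carrier - anchor_p)),
       ("carrier_d", some carrier_d),
       ("post_carrier_lower_d_count",
         some ((post.filter (fun nd => nd.2 < carrier_d)).map (fun _ => (1 : Int))).sum),
       ("post_carrier_ge_d_count",
         some ((post.filter (fun nd => carrier_d ≤ nd.2)).map (fun _ => (1 : Int))).sum)]

-- ===== PORT B =====
-- the `while m % 2 == 0 and m > 1` loop of _dcount
def evenLoopB : Nat → Int → Int → Int × Int
  | 0, m, e => (m, e)
  | fuel + 1, m, e =>
    if PySem.Int.mod m 2 = 0 ∧ 1 < m then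
      evenLoopB fuel (PySem.Int.floordiv m 2) (e + 1)
    else (m, e)

-- the inner `while m % p == 0` loop of _dcount (same totalizing guards as extractLoop)
def extractLoopB : Nat → Int → Int → Int → Int × Int
  | 0, m, _, e => (m, e)
  | fuel + 1, m, p, e =>
    if 2 ≤ p ∧ 0 < m ∧ PySem.Int.mod m p = 0 then
      extractLoopB fuel (PySem.Int.floordiv m p) p (e + 1)
    else (m, e)

-- the `while p * p <= m` loop of _dcount over odd candidates
def oddLoopB : Nat → Int → Int → Int → Int
  | 0, _, _, total => total
  | fuel + 1, m, p, total =>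
    if 3 ≤ p ∧ p * p ≤ m then
      if PySem.Int.mod m p = 0 then
        oddLoopB fuel (extractLoopB m.toNat m p 0).1 p (total * ((extractLoopB m.toNat m p 0).2 + 1))
      else oddLoopB fuel m (p + 2) total
    else if 1 < m then total * 2 else total

def dcountB (n : Int) : Int :=
  oddLoopB ((2 * (evenLoopB (n.toNat + 1) n 0).1 - 3).toNat + 1)
    (evenLoopB (n.toNat + 1) n 0).1 3 (1 * ((evenLoopB (n.toNat + 1) n 0).2 + 1))

-- the loop body of B's single pass (state: None or (carrier, carrier_d, ge))
def bstep (st : Option (Int × Int × Int)) (n : Int) : Option (Int × Int × Int) :=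
  if 2 ≤ n ∧ dcountB n = 2 then st
  else
    match st with
    | none => some (n, dcountB n, 0)
    | some (c, cd, g) => if dcountB n < cd then some (n, dcountB n, 0) else some (c, cd, g + 1)

def chamber_carrier_alt (anchor_p : Int) (offset : Int) : List (String × Option Int) :=
  match (PySem.List.pyRange (anchor_p + 1) (anchor_p + offset) 1).foldl bstep none with
  | none =>
    [("carrier", none), ("carrier_offset", none), ("carrier_d", none),
     ("post_carrier_lower_d_count", some 0), ("post_carrier_ge_d_count", some 0)]
  | some (c, cd, g) =>
    [("carrier", some c),
     ("carrier_offset", some (c - anchor_p)),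
     ("carrier_d", some cd),
     ("post_carrier_lower_d_count", some 0),
     ("post_carrier_ge_d_count", some g)]

-- ===== PRECONDITION & SPEC =====
def Spec_chamber_carrier (anchor_p : Int) (offset : Int) (out : List (String × Option Int)) : Prop := out = chamber_carrier_alt anchor_p offset
instance (anchor_p : Int) (offset : Int) (out : List (String × Option Int)) : Decidable (Spec_chamber_carrier anchor_p offset out) := by unfold Spec_chamber_carrier; infer_instance

-- ===== CLAIM (what is proved, stated in full; the proofs are below) =====
def Claim_equal_chamber_carrier : Prop := ∀ (anchor_p : Int) (offset : Int), Dom_chamber_carrier anchor_p offset → Spec_chamber_carrier anchor_p offset (chamber_carrier anchor_p offset)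

-- ===== LEMMAS AND PROOFS =====

-- number of divisors, with the loops' convention 1 for n ≤ 0
def specD (n : Int) : Int := if n ≤ 0 then 1 else ((Nat.divisors n.toNat).card : Int)

-- ---- number-theoretic facts over ℕ ----

theorem ntPrimeOfMinDivisor (f : ℕ) (hf : 2 ≤ f)
    (hmin : ∀ d : ℕ, 2 ≤ d → d < f → ¬ d ∣ f) : f.Prime := by
  rw [Nat.prime_def_lt]
  refine ⟨hf, fun m hm hdvd => ?_⟩
  by_contra h1
  have hm0 : m ≠ 0 := by
    rintro rfl
    have := Nat.eq_zero_of_zero_dvd hdvd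
    omega
  exact hmin m (by omega) hm hdvd

theorem ntCardPowMul (p k m : ℕ) (hp : p.Prime) (hpm : ¬ p ∣ m) :
    (Nat.divisors (p ^ k * m)).card = (k + 1) * (Nat.divisors m).card := by
  have hc : (p ^ k).Coprime m := Nat.Coprime.pow_left k ((Nat.Prime.coprime_iff_not_dvd hp).2 hpm)
  rw [hc.card_divisors_mul, Nat.divisors_prime_pow hp, Finset.card_map, Finset.card_range]

theorem ntCardPrime (p : ℕ) (hp : p.Prime) : p.divisors.card = 2 := by
  rw [hp.divisors, Finset.card_insert_of_notMem (by simp [Ne.symm hp.ne_one]),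
    Finset.card_singleton]

theorem ntPrimeOfCard (n : ℕ) (h2 : 2 ≤ n) (h : n.divisors.card = 2) : n.Prime := by
  by_contra hnp
  obtain ⟨m, hm, hm2, hmlt⟩ := Nat.exists_dvd_of_not_prime2 h2 hnp
  have hsub : ({1, m, n} : Finset ℕ) ⊆ n.divisors := by
    intro x hx
    simp only [Finset.mem_insert, Finset.mem_singleton] at hx
    rcases hx with rfl | rfl | rfl <;> simp [Nat.mem_divisors, hm] <;> omega
  have hcard : ({1, m, n} : Finset ℕ).card = 3 := by
    rw [Finset.card_insert_of_notMem (by simp; omega),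
      Finset.card_insert_of_notMem (by simp; omega), Finset.card_singleton]
  have := Finset.card_le_card hsub
  omega

theorem ntPrimeOfNoSmall (n : ℕ) (h2 : 2 ≤ n) (h : ∀ d, 2 ≤ d → d * d ≤ n → ¬ d ∣ n) :
    n.Prime :=
  Nat.prime_def_le_sqrt.2 ⟨h2, fun m hm hms => h m hm (Nat.le_sqrt.1 hms)⟩

theorem ntNoSmallOfPrime (n : ℕ) (hp : n.Prime) : ∀ d, 2 ≤ d → d * d ≤ n → ¬ d ∣ n := by
  intro d hd hdd hdvd
  rcases (Nat.prime_def.1 hp).2 d hdvd with rfl | rfl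
  · omega
  · nlinarith [hp.two_le]

-- ---- ℤ ↔ ℕ glue ----

theorem intDvdIffToNat (d r : Int) (hd : 0 ≤ d) (hr : 0 ≤ r) :
    d ∣ r ↔ d.toNat ∣ r.toNat := by
  rw [← Int.natCast_dvd_natCast, Int.toNat_of_nonneg hd, Int.toNat_of_nonneg hr]

theorem specD_of_nonpos (n : Int) (h : n ≤ 0) : specD n = 1 := if_pos h

theorem specD_one : specD 1 = 1 := by simp [specD, Nat.divisors_one]

theorem specD_mul_pow (f r : Int) (k : ℕ) (hf : 2 ≤ f) (hfp : Nat.Prime f.toNat)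
    (hr : 0 < r) (hnd : ¬ f ∣ r) : specD (f ^ k * r) = (k + 1) * specD r := by
  have hfk : (0:Int) < f ^ k := pow_pos (by omega) k
  have hpos : 0 < f ^ k * r := mul_pos hfk hr
  have htn : (f ^ k * r).toNat = f.toNat ^ k * r.toNat := by
    rw [Int.toNat_mul (le_of_lt hfk) (le_of_lt hr)]
    congr 1
    exact Int.toNat_pow_of_nonneg (by omega) k
  rw [specD, if_neg (by omega), specD, if_neg (by omega), htn,
    ntCardPowMul f.toNat k r.toNat hfp (by rwa [← intDvdIffToNat f r (by omega) (by omega)])]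
  push_cast
  ring

theorem specD_of_prime (r : Int) (h1 : 1 < r) (hp : Nat.Prime r.toNat) : specD r = 2 := by
  rw [specD, if_neg (by omega), ntCardPrime _ hp]
  rfl

theorem specD_eq_two_iff (n : Int) (h : 2 ≤ n) : specD n = 2 ↔ Nat.Prime n.toNat := by
  constructor
  · intro hc
    refine ntPrimeOfCard n.toNat (by omega) ?_
    rw [specD, if_neg (by omega)] at hc
    exact_mod_cast hc
  · exact specD_of_prime n (by omega)

-- division strictly shrinks a positive dividend
theorem pvEdivLtSelf (a b : Int) (ha : 0 < a) (hb : 2 ≤ b) : a / b < a := by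
  have h1 := Int.ediv_add_emod a b
  have h2 := Int.emod_nonneg a (by omega : b ≠ 0)
  have h3 : 0 ≤ a / b := Int.ediv_nonneg (by omega) (by omega)
  nlinarith

-- ---- the inner extraction loop ----

theorem extractLoop_spec (f : Int) (hf : 2 ≤ f) : ∀ (fuel : Nat) (r e : Int), 0 < r →
    r.toNat ≤ fuel →
    0 < (extractLoop fuel r f e).1 ∧ ¬ (f ∣ (extractLoop fuel r f e).1) ∧
    ∃ k : ℕ, (extractLoop fuel r f e).2 = e + k ∧ r = f ^ k * (extractLoop fuel r f e).1 ∧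
      (f ∣ r → 1 ≤ k) := by
  intro fuel
  induction fuel with
  | zero => intro r e hr hle; exact absurd hle (by omega)
  | succ fuel ih =>
    intro r e hr hle
    by_cases h : 2 ≤ f ∧ 0 < r ∧ PySem.Int.mod r f = 0
    · have hdvd : f ∣ r := (PySem.Int.mod_eq_zero_iff_dvd r f).1 h.2.2
      have hfd : PySem.Int.floordiv r f = r / f := PySem.Int.floordiv_eq_ediv_of_pos (by omega)
      have hq : f * (r / f) = r := Int.mul_ediv_cancel' hdvd
      have hqpos : 0 < r / f := by nlinarith [Int.ediv_nonneg (le_of_lt hr) (by omega : (0:Int) ≤ f)]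
      have hlt : r / f < r := pvEdivLtSelf r f hr hf
      rw [extractLoop, if_pos h]
      obtain ⟨h1, h2, k, hk1, hk2, _⟩ := ih (PySem.Int.floordiv r f) (e + 1)
        (by rw [hfd]; exact hqpos) (by rw [hfd]; omega)
      refine ⟨h1, h2, k + 1, ?_, ?_, fun _ => by omega⟩
      · rw [hk1]; push_cast; ring
      · rw [hfd] at hk2 ⊢
        set X := (extractLoop fuel (r / f) f (e + 1)).1 with hX
        have hrx : r = f * (f ^ k * X) := by rw [← hk2]; exact hq.symm
        rw [hrx]
        ring
    · rw [extractLoop, if_neg h]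
      have hnd : ¬ f ∣ r := by
        intro hdvd
        exact h ⟨hf, hr, (PySem.Int.mod_eq_zero_iff_dvd r f).2 hdvd⟩
      exact ⟨hr, hnd, 0, by simp, by ring, fun hdvd => absurd hdvd hnd⟩

-- ---- A's divisor_count loop ----

theorem divCountLoop_spec : ∀ (fuel : Nat) (r f t : Int), (2 * r - f).toNat < fuel →
    0 < r → 2 ≤ f → (f = 2 ∨ f % 2 = 1) →
    (∀ d : Int, 2 ≤ d → d < f → ¬ d ∣ r) → divCountLoop fuel r f t = t * specD r := by
  intro fuel
  induction fuel with
  | zero => intro r f t hfuel _ _ _ _; exact absurd hfuel (by omega)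
  | succ fuel ih =>
    intro r f t hfuel hr hf hpar hinv
    by_cases h : 2 ≤ f ∧ f * f ≤ r
    · have hff : 2 * f ≤ f * f := by nlinarith [h.1]
      have hfr : f ≤ r := by omega
      by_cases hmod : PySem.Int.mod r f = 0
      · have hdvd : f ∣ r := (PySem.Int.mod_eq_zero_iff_dvd r f).1 hmod
        have hfp : Nat.Prime f.toNat := by
          refine ntPrimeOfMinDivisor f.toNat (by omega) ?_
          intro d hd hdf hddvd
          have : (d : Int) ∣ f := by
            rw [intDvdIffToNat _ _ (by omega) (by omega)]
            simpa using hddvd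
          exact hinv d (by omega) (by omega) (dvd_trans this hdvd)
        obtain ⟨h1, h2, k, hk1, hk2, hk3⟩ := extractLoop_spec f hf r.toNat r 0 hr le_rfl
        have hk1' : 1 ≤ k := hk3 hdvd
        have hxlt : (extractLoop r.toNat r f 0).1 < r := by
          have hfk : (2:Int) ≤ f ^ k := by
            calc (2:Int) ≤ f := hf
            _ = f ^ 1 := (pow_one f).symm
            _ ≤ f ^ k := pow_le_pow_right₀ (by omega) hk1'
          nlinarith [hk2, h1]
        have hf' : 2 ≤ f + (if f = 2 then 1 else 2) := by split <;> omega
        have hpar' : (f + (if f = 2 then 1 else 2)) = 2 ∨ (f + (if f = 2 then 1 else 2)) % 2 = 1 := by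
          rcases hpar with h' | h'
          · rw [if_pos h']; omega
          · rw [if_neg (by omega : ¬ f = 2)]; omega
        have hinv' : ∀ d : Int, 2 ≤ d → d < f + (if f = 2 then 1 else 2) →
            ¬ d ∣ (extractLoop r.toNat r f 0).1 := by
          intro d hd hdlt hddvd
          have hdr : (extractLoop r.toNat r f 0).1 ∣ r := Dvd.intro_left _ hk2.symm
          have hddr : d ∣ r := dvd_trans hddvd hdr
          rcases lt_trichotomy d f with hlt | heq | hgt
          · exact hinv d hd hlt hddr
          · subst heq; exact h2 hddvd
          · have hfne : f ≠ 2 := by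
              intro hfe; rw [hfe, if_pos rfl] at hdlt; omega
            have hfodd : f % 2 = 1 := by rcases hpar with h' | h' <;> omega
            have hde : d = f + 1 := by rw [if_neg hfne] at hdlt; omega
            have h2d : (2:Int) ∣ d := by omega
            exact hinv 2 (by omega) (by omega) (dvd_trans h2d hddr)
        have hfuel' : (2 * (extractLoop r.toNat r f 0).1 - (f + (if f = 2 then 1 else 2))).toNat < fuel := by
          split <;> omega
        have hrw := ih (extractLoop r.toNat r f 0).1 (f + (if f = 2 then 1 else 2))
          (t * ((extractLoop r.toNat r f 0).2 + 1)) hfuel' h1 hf' hpar' hinv'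
        rw [divCountLoop, if_pos h, if_pos hmod, hrw]
        have hspec : specD r = ((k:Int) + 1) * specD (extractLoop r.toNat r f 0).1 := by
          conv_lhs => rw [hk2]
          exact specD_mul_pow f _ k hf hfp h1 h2
        rw [hspec, hk1]
        ring
      · have hf' : 2 ≤ f + (if f = 2 then 1 else 2) := by split <;> omega
        have hpar' : (f + (if f = 2 then 1 else 2)) = 2 ∨ (f + (if f = 2 then 1 else 2)) % 2 = 1 := by
          rcases hpar with h' | h'
          · rw [if_pos h']; omega
          · rw [if_neg (by omega : ¬ f = 2)]; omega
        have hinv' : ∀ d : Int, 2 ≤ d → d < f + (if f = 2 then 1 else 2) → ¬ d ∣ r := by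
          intro d hd hdlt hddvd
          rcases lt_trichotomy d f with hlt | heq | hgt
          · exact hinv d hd hlt hddvd
          · subst heq; exact hmod ((PySem.Int.mod_eq_zero_iff_dvd r d).2 hddvd)
          · have hfne : f ≠ 2 := by
              intro hfe; rw [hfe, if_pos rfl] at hdlt; omega
            have hfodd : f % 2 = 1 := by rcases hpar with h' | h' <;> omega
            have hde : d = f + 1 := by rw [if_neg hfne] at hdlt; omega
            have h2d : (2:Int) ∣ d := by omega
            exact hinv 2 (by omega) (by omega) (dvd_trans h2d hddvd)
        have hfuel' : (2 * r - (f + (if f = 2 then 1 else 2))).toNat < fuel := by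
          split <;> omega
        rw [divCountLoop, if_pos h, if_neg hmod]
        exact ih r (f + (if f = 2 then 1 else 2)) t hfuel' hr hf' hpar' hinv'
    · have hrf : r < f * f := by
        rcases not_and_or.1 h with h' | h'
        · omega
        · omega
      by_cases h1 : 1 < r
      · have hp : Nat.Prime r.toNat := by
          refine ntPrimeOfNoSmall r.toNat (by omega) ?_
          intro d hd hdd hdvd
          have hdi : (d : Int) ∣ r := by
            rw [intDvdIffToNat _ _ (by omega) (by omega)]
            simpa using hdvd
          have hdd' : (d : Int) * (d : Int) ≤ r := by
            have h2 : ((d * d : ℕ) : Int) ≤ ((r.toNat : ℕ) : Int) := Nat.cast_le.2 hdd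
            rw [Int.toNat_of_nonneg (by omega)] at h2
            push_cast at h2
            exact h2
          have hdlt : (d : Int) < f := by nlinarith [hd]
          exact hinv d (by exact_mod_cast hd) hdlt hdi
        rw [divCountLoop, if_neg h, if_pos h1, specD_of_prime r h1 hp]
      · have hre : r = 1 := by omega
        subst hre
        rw [divCountLoop, if_neg h, if_neg h1, specD_one, mul_one]

theorem pyDivisorCount_spec : ∀ n : Int, pyDivisorCount n = specD n := by
  intro n
  by_cases hn : 0 < n
  · have := divCountLoop_spec ((2 * n - 2).toNat + 1) n 2 1 (by omega) hn (by omega)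
      (Or.inl rfl) (by intro d hd hdlt; omega)
    rw [pyDivisorCount, this, one_mul]
  · rw [pyDivisorCount, divCountLoop, if_neg (by omega), if_neg (by omega),
      specD_of_nonpos n (by omega)]

-- ---- B's _dcount loops ----

theorem evenLoopB_spec : ∀ (fuel : Nat) (m e : Int), 0 < m → m.toNat < fuel →
    0 < (evenLoopB fuel m e).1 ∧ ¬ ((2:Int) ∣ (evenLoopB fuel m e).1) ∧
    ∃ k : ℕ, (evenLoopB fuel m e).2 = e + k ∧ m = 2 ^ k * (evenLoopB fuel m e).1 := by
  intro fuel
  induction fuel with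
  | zero => intro m e hm hle; exact absurd hle (by omega)
  | succ fuel ih =>
    intro m e hm hle
    by_cases h : PySem.Int.mod m 2 = 0 ∧ 1 < m
    · have hdvd : (2:Int) ∣ m := (PySem.Int.mod_eq_zero_iff_dvd m 2).1 h.1
      have hfd : PySem.Int.floordiv m 2 = m / 2 := PySem.Int.floordiv_eq_ediv_of_pos (by omega)
      have hq : 2 * (m / 2) = m := Int.mul_ediv_cancel' hdvd
      have hqpos : 0 < m / 2 := by omega
      rw [evenLoopB, if_pos h]
      obtain ⟨h1, h2, k, hk1, hk2⟩ := ih (PySem.Int.floordiv m 2) (e + 1)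
        (by rw [hfd]; exact hqpos) (by rw [hfd]; omega)
      refine ⟨h1, h2, k + 1, ?_, ?_⟩
      · rw [hk1]; push_cast; ring
      · rw [hfd] at hk2 ⊢
        set X := (evenLoopB fuel (m / 2) (e + 1)).1 with hX
        have hrx : m = 2 * (2 ^ k * X) := by rw [← hk2]; exact hq.symm
        rw [hrx]
        ring
    · rw [evenLoopB, if_neg h]
      have hnd : ¬ (2:Int) ∣ m := by
        intro hdvd
        have hmod : PySem.Int.mod m 2 = 0 := (PySem.Int.mod_eq_zero_iff_dvd m 2).2 hdvd
        have : ¬ 1 < m := fun hlt => h ⟨hmod, hlt⟩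
        have hm1 : m = 1 := by omega
        rw [hm1] at hdvd
        omega
      exact ⟨hm, hnd, 0, by simp, by ring⟩

theorem extractLoopB_eq : ∀ (fuel : Nat) (m p e : Int), extractLoopB fuel m p e = extractLoop fuel m p e := by
  intro fuel
  induction fuel with
  | zero => intro m p e; rfl
  | succ fuel ih =>
    intro m p e
    rw [extractLoopB, extractLoop]
    by_cases h : 2 ≤ p ∧ 0 < m ∧ PySem.Int.mod m p = 0
    · rw [if_pos h, if_pos h, ih]
    · rw [if_neg h, if_neg h]

theorem oddLoopB_spec : ∀ (fuel : Nat) (m p t : Int), (2 * m - p).toNat < fuel →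
    0 < m → 3 ≤ p → p % 2 = 1 →
    (∀ d : Int, 2 ≤ d → d < p → ¬ d ∣ m) → oddLoopB fuel m p t = t * specD m := by
  intro fuel
  induction fuel with
  | zero => intro m p t hfuel _ _ _ _; exact absurd hfuel (by omega)
  | succ fuel ih =>
    intro m p t hfuel hm hp hpar hinv
    by_cases h : 3 ≤ p ∧ p * p ≤ m
    · have hpf : 2 * p ≤ p * p := by nlinarith [h.1]
      have hpm : p ≤ m := by omega
      by_cases hmod : PySem.Int.mod m p = 0
      · have hdvd : p ∣ m := (PySem.Int.mod_eq_zero_iff_dvd m p).1 hmod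
        have hpp : Nat.Prime p.toNat := by
          refine ntPrimeOfMinDivisor p.toNat (by omega) ?_
          intro d hd hdf hddvd
          have : (d : Int) ∣ p := by
            rw [intDvdIffToNat _ _ (by omega) (by omega)]
            simpa using hddvd
          exact hinv d (by omega) (by omega) (dvd_trans this hdvd)
        obtain ⟨h1, h2, k, hk1, hk2, hk3⟩ := extractLoop_spec p (by omega) m.toNat m 0 hm le_rfl
        have hk1' : 1 ≤ k := hk3 hdvd
        have hxlt : (extractLoop m.toNat m p 0).1 < m := by
          have hpk : (2:Int) ≤ p ^ k := by
            calc (2:Int) ≤ p := by omega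
            _ = p ^ 1 := (pow_one p).symm
            _ ≤ p ^ k := pow_le_pow_right₀ (by omega) hk1'
          nlinarith [hk2, h1]
        have hinv' : ∀ d : Int, 2 ≤ d → d < p → ¬ d ∣ (extractLoop m.toNat m p 0).1 := by
          intro d hd hdlt hddvd
          have hdr : (extractLoop m.toNat m p 0).1 ∣ m := Dvd.intro_left _ hk2.symm
          exact hinv d hd hdlt (dvd_trans hddvd hdr)
        have hfuel' : (2 * (extractLoop m.toNat m p 0).1 - p).toNat < fuel := by omega
        have hrw := ih (extractLoop m.toNat m p 0).1 p
          (t * ((extractLoop m.toNat m p 0).2 + 1)) hfuel' h1 (by omega) hpar hinv'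
        rw [oddLoopB, if_pos h, if_pos hmod, extractLoopB_eq, hrw]
        have hspec : specD m = ((k:Int) + 1) * specD (extractLoop m.toNat m p 0).1 := by
          conv_lhs => rw [hk2]
          exact specD_mul_pow p _ k (by omega) hpp h1 h2
        rw [hspec, hk1]
        ring
      · have hinv' : ∀ d : Int, 2 ≤ d → d < p + 2 → ¬ d ∣ m := by
          intro d hd hdlt hddvd
          rcases lt_trichotomy d p with hlt | heq | hgt
          · exact hinv d hd hlt hddvd
          · subst heq; exact hmod ((PySem.Int.mod_eq_zero_iff_dvd m d).2 hddvd)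
          · have hde : d = p + 1 := by omega
            have h2d : (2:Int) ∣ d := by omega
            exact hinv 2 (by omega) (by omega) (dvd_trans h2d hddvd)
        rw [oddLoopB, if_pos h, if_neg hmod]
        exact ih m (p + 2) t (by omega) hm (by omega) (by omega) hinv'
    · have hmp : m < p * p := by
        rcases not_and_or.1 h with h' | h'
        · omega
        · omega
      by_cases h1 : 1 < m
      · have hp' : Nat.Prime m.toNat := by
          refine ntPrimeOfNoSmall m.toNat (by omega) ?_
          intro d hd hdd hdvd
          have hdi : (d : Int) ∣ m := by
            rw [intDvdIffToNat _ _ (by omega) (by omega)]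
            simpa using hdvd
          have hdd' : (d : Int) * (d : Int) ≤ m := by
            have h2 : ((d * d : ℕ) : Int) ≤ ((m.toNat : ℕ) : Int) := Nat.cast_le.2 hdd
            rw [Int.toNat_of_nonneg (by omega)] at h2
            push_cast at h2
            exact h2
          have hdlt : (d : Int) < p := by nlinarith [hd]
          exact hinv d (by exact_mod_cast hd) hdlt hdi
        rw [oddLoopB, if_neg h, if_pos h1, specD_of_prime m h1 hp']
      · have hme : m = 1 := by omega
        subst hme
        rw [oddLoopB, if_neg h, if_neg h1, specD_one, mul_one]

theorem dcountB_spec : ∀ n : Int, dcountB n = specD n := by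
  intro n
  by_cases hn : 0 < n
  · obtain ⟨h1, h2, k, hk1, hk2⟩ := evenLoopB_spec (n.toNat + 1) n 0 hn (by omega)
    have hinv : ∀ d : Int, 2 ≤ d → d < 3 → ¬ d ∣ (evenLoopB (n.toNat + 1) n 0).1 := by
      intro d hd hdlt hddvd
      have hde : d = 2 := by omega
      rw [hde] at hddvd
      exact h2 hddvd
    rw [dcountB, oddLoopB_spec _ _ 3 _ (by omega) h1 (by omega) (by omega) hinv]
    have hspec : specD n = ((k:Int) + 1) * specD (evenLoopB (n.toNat + 1) n 0).1 := by
      conv_lhs => rw [hk2]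
      exact specD_mul_pow 2 _ k (by omega) (by decide) h1 h2
    rw [hspec, hk1]
    ring
  · have he : evenLoopB (n.toNat + 1) n 0 = (n, 0) := by
      have hnt : n.toNat + 1 = 0 + 1 := by omega
      rw [hnt, evenLoopB, if_neg (by omega)]
    rw [dcountB, he]
    rw [oddLoopB, if_neg (by simp; omega), if_neg (by omega), specD_of_nonpos n (by omega)]
    norm_num

-- ---- A's is_prime ----

-- d ≤ isqrt n  ↔  d*d ≤ n  (for 0 ≤ n)
theorem le_pvIsqrt_iff (n d : Int) (hn : 0 ≤ n) (hd : 0 ≤ d) :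
    d ≤ pvIsqrt n ↔ d * d ≤ n := by
  rw [pvIsqrt, Int.ofNat_eq_natCast]
  constructor
  · intro h
    have hdn : d.toNat ≤ Nat.sqrt n.toNat := by omega
    have := Nat.le_sqrt.1 hdn
    have h2 : ((d.toNat * d.toNat : ℕ) : Int) ≤ ((n.toNat : ℕ) : Int) := Nat.cast_le.2 this
    push_cast at h2
    rw [Int.toNat_of_nonneg hd, Int.toNat_of_nonneg hn] at h2
    exact h2
  · intro h
    have h2 : d.toNat * d.toNat ≤ n.toNat := by
      have : ((d.toNat * d.toNat : ℕ) : Int) ≤ ((n.toNat : ℕ) : Int) := by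
        push_cast
        rw [Int.toNat_of_nonneg hd, Int.toNat_of_nonneg hn]
        exact h
      exact_mod_cast this
    have := Nat.le_sqrt.2 h2
    omega

theorem isPrimeLoop_spec (n : Int) (hn : 2 ≤ n) (h2 : ¬ (2:Int) ∣ n) (h3 : ¬ (3:Int) ∣ n) :
    ∀ (fuel : Nat) (f : Int), (pvIsqrt n + 1 - f).toNat < fuel → 5 ≤ f → f % 6 = 5 →
    (∀ d : Int, 2 ≤ d → d < f → ¬ (d ∣ n ∧ d * d ≤ n)) →
    (isPrimeLoop fuel n (pvIsqrt n) f = true ↔ ∀ d : Int, 2 ≤ d → d * d ≤ n → ¬ d ∣ n) := by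
  intro fuel
  induction fuel with
  | zero => intro f hfuel _ _ _; exact absurd hfuel (by omega)
  | succ fuel ih =>
    intro f hfuel hf hpar hinv
    by_cases hle : f ≤ pvIsqrt n
    · by_cases hfound : PySem.Int.mod n f = 0 ∨ PySem.Int.mod n (f + 2) = 0
      · rw [isPrimeLoop, if_pos hle, if_pos hfound]
        refine iff_of_false (by simp) ?_
        intro hall
        -- the loop found a divisor: exhibit a small one, contradicting hall
        have hsq : f * f ≤ n := (le_pvIsqrt_iff n f (by omega) (by omega)).1 hle
        rcases hfound with hmod | hmod
        · have hdvd : f ∣ n := (PySem.Int.mod_eq_zero_iff_dvd n f).1 hmod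
          exact hall f (by omega) hsq hdvd
        · have hdvd : (f + 2) ∣ n := (PySem.Int.mod_eq_zero_iff_dvd n (f + 2)).1 hmod
          by_cases hsq2 : (f + 2) * (f + 2) ≤ n
          · exact hall (f + 2) (by omega) hsq2 hdvd
          · -- the cofactor n / (f+2) is a small divisor
            obtain ⟨c, hc⟩ := hdvd
            have hcpos : 0 < c := by nlinarith
            have hc2 : 2 ≤ c := by
              rcases (by omega : c = 1 ∨ 2 ≤ c) with hc1 | hge
              · rw [hc1, mul_one] at hc; nlinarith
              · exact hge
            exact hall c hc2 (by nlinarith) (Dvd.intro_left _ hc.symm)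
      · have hinv' : ∀ d : Int, 2 ≤ d → d < f + 6 → ¬ (d ∣ n ∧ d * d ≤ n) := by
          intro d hd hdlt ⟨hddvd, hdsq⟩
          have h6 : d < f ∨ d = f ∨ d = f + 1 ∨ d = f + 2 ∨ d = f + 3 ∨ d = f + 4 ∨ d = f + 5 := by
            omega
          rcases h6 with h' | h' | h' | h' | h' | h' | h'
          · exact hinv d hd h' ⟨hddvd, hdsq⟩
          · subst h'
            exact hfound (Or.inl ((PySem.Int.mod_eq_zero_iff_dvd n d).2 hddvd))
          · exact h2 (dvd_trans (by omega : (2:Int) ∣ d) hddvd)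
          · subst h'
            exact hfound (Or.inr ((PySem.Int.mod_eq_zero_iff_dvd n (f + 2)).2 hddvd))
          · exact h2 (dvd_trans (by omega : (2:Int) ∣ d) hddvd)
          · exact h3 (dvd_trans (by omega : (3:Int) ∣ d) hddvd)
          · exact h2 (dvd_trans (by omega : (2:Int) ∣ d) hddvd)
        rw [isPrimeLoop, if_pos hle, if_neg hfound]
        exact ih (f + 6) (by omega) (by omega) (by omega) hinv'
    · rw [isPrimeLoop, if_neg hle]
      refine iff_of_true rfl ?_
      intro d hd hdsq hddvd
      have hdle : d ≤ pvIsqrt n := (le_pvIsqrt_iff n d (by omega) (by omega)).2 hdsq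
      exact hinv d hd (by omega) ⟨hddvd, hdsq⟩

theorem pyIsPrime_spec : ∀ n : Int, pyIsPrime n = true ↔ (2 ≤ n ∧ Nat.Prime n.toNat) := by
  intro n
  rw [pyIsPrime]
  by_cases h1 : n < 2
  · rw [if_pos h1]
    refine iff_of_false (by simp) ?_
    intro ⟨h, _⟩
    omega
  rw [if_neg h1]
  by_cases h23 : n = 2 ∨ n = 3
  · rw [if_pos h23]
    rcases h23 with rfl | rfl <;> simp <;> decide
  rw [if_neg h23]
  have hn4 : 4 ≤ n := by omega
  by_cases hsmall : PySem.Int.mod n 2 = 0 ∨ PySem.Int.mod n 3 = 0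
  · rw [if_pos hsmall]
    refine iff_of_false (by simp) ?_
    intro ⟨_, hp⟩
    rcases hsmall with hm | hm
    · have hdvd : (2:Int) ∣ n := (PySem.Int.mod_eq_zero_iff_dvd n 2).1 hm
      have : (2:ℕ) ∣ n.toNat := by
        have h' := (intDvdIffToNat 2 n (by omega) (by omega)).1 hdvd
        simpa using h'
      rcases (Nat.prime_def.1 hp).2 2 this with h' | h' <;> omega
    · have hdvd : (3:Int) ∣ n := (PySem.Int.mod_eq_zero_iff_dvd n 3).1 hm
      have : (3:ℕ) ∣ n.toNat := by
        have h' := (intDvdIffToNat 3 n (by omega) (by omega)).1 hdvd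
        simpa using h'
      rcases (Nat.prime_def.1 hp).2 3 this with h' | h' <;> omega
  rw [if_neg hsmall]
  have hnd2 : ¬ (2:Int) ∣ n := fun hd => hsmall (Or.inl ((PySem.Int.mod_eq_zero_iff_dvd n 2).2 hd))
  have hnd3 : ¬ (3:Int) ∣ n := fun hd => hsmall (Or.inr ((PySem.Int.mod_eq_zero_iff_dvd n 3).2 hd))
  have hinv : ∀ d : Int, 2 ≤ d → d < 5 → ¬ (d ∣ n ∧ d * d ≤ n) := by
    intro d hd hdlt ⟨hddvd, _⟩
    rcases (by omega : d = 2 ∨ d = 3 ∨ d = 4) with rfl | rfl | rfl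
    · exact hnd2 hddvd
    · exact hnd3 hddvd
    · exact hnd2 (dvd_trans (by norm_num) hddvd)
  rw [isPrimeLoop_spec n (by omega) hnd2 hnd3 ((pvIsqrt n + 1 - 5).toNat + 1) 5 (by omega)
    (by omega) (by omega) hinv]
  constructor
  · intro h
    refine ⟨by omega, ntPrimeOfNoSmall n.toNat (by omega) ?_⟩
    intro d hd hdd hdvd
    have hdi : (d : Int) ∣ n := by
      rw [intDvdIffToNat _ _ (by omega) (by omega)]
      simpa using hdvd
    have hdd' : (d : Int) * (d : Int) ≤ n := by
      have hc : ((d * d : ℕ) : Int) ≤ ((n.toNat : ℕ) : Int) := Nat.cast_le.2 hdd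
      rw [Int.toNat_of_nonneg (by omega)] at hc
      push_cast at hc
      exact hc
    exact h d (by exact_mod_cast hd) hdd' hdi
  · intro ⟨_, hp⟩ d hd hdsq hddvd
    have hsqn : d.toNat * d.toNat ≤ n.toNat := by
      have hcast : ((d.toNat * d.toNat : ℕ) : Int) ≤ ((n.toNat : ℕ) : Int) := by
        push_cast
        rw [Int.toNat_of_nonneg (by omega : (0:Int) ≤ d), Int.toNat_of_nonneg (by omega : (0:Int) ≤ n)]
        exact hdsq
      exact_mod_cast hcast
    have hnosmall := ntNoSmallOfPrime n.toNat hp d.toNat (by omega) hsqn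
    exact hnosmall ((intDvdIffToNat d n (by omega) (by omega)).1 hddvd)

-- ---- putting it together ----

theorem prime_test_eq (n : Int) : pyIsPrime n = true ↔ (2 ≤ n ∧ dcountB n = 2) := by
  rw [pyIsPrime_spec, dcountB_spec]
  constructor
  · intro ⟨ha, hb⟩
    exact ⟨ha, (specD_eq_two_iff n ha).2 hb⟩
  · intro ⟨ha, hb⟩
    exact ⟨ha, (specD_eq_two_iff n ha).1 hb⟩

-- the step of B's fold, seen on (n, divisor count) pairs
def stepB (st : Option (Int × Int × Int)) (x : Int × Int) : Option (Int × Int × Int) :=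
  match st with
  | none => some (x.1, x.2, 0)
  | some (c, cd, g) => if x.2 < cd then some (x.1, x.2, 0) else some (c, cd, g + 1)

theorem bridge : ∀ (l : List Int) (st : Option (Int × Int × Int)),
    l.foldl bstep st =
      ((l.filter (fun n => !pyIsPrime n)).map (fun n => (n, pyDivisorCount n))).foldl stepB st := by
  intro l
  induction l with
  | nil => intro st; rfl
  | cons n t ih =>
    intro st
    by_cases hp : pyIsPrime n = true
    · have hcond : 2 ≤ n ∧ dcountB n = 2 := (prime_test_eq n).1 hp
      have hfil : (n :: t).filter (fun n => !pyIsPrime n) = t.filter (fun n => !pyIsPrime n) :=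
        List.filter_cons_of_neg (by simp [hp])
      rw [List.foldl_cons, show bstep st n = st from by rw [bstep.eq_def, if_pos hcond], hfil, ih]
    · have hp' : pyIsPrime n = false := by simpa using hp
      have hcond : ¬ (2 ≤ n ∧ dcountB n = 2) := fun hc => by
        rw [(prime_test_eq n).2 hc] at hp'
        simp at hp'
      have hfil : (n :: t).filter (fun n => !pyIsPrime n) = n :: t.filter (fun n => !pyIsPrime n) :=
        List.filter_cons_of_pos (by simp [hp'])
      rw [List.foldl_cons, hfil, List.map_cons, List.foldl_cons, ih]
      congr 1
      rw [bstep.eq_def, if_neg hcond]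
      cases st with
      | none => simp [stepB, dcountB_spec, pyDivisorCount_spec]
      | some p =>
        rcases p with ⟨c, cd, g⟩
        simp [stepB, dcountB_spec, pyDivisorCount_spec]

theorem min2?_append_singleton {α : Type} (xs : List α) (x : α)
    (k1 k2 : α → Int) :
    PySem.List.min2? (xs ++ [x]) k1 k2 =
      (match PySem.List.min2? xs k1 k2 with
       | none => some x
       | some m =>
         if (decide (k1 x < k1 m) || (!decide (k1 m < k1 x) && decide (k2 x < k2 m))) = true
         then some x else some m) := by
  rw [PySem.List.min2?, List.foldl_append]
  rfl

-- invariant of B's scan over a strictly n-increasing composite list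
theorem scan_spec : ∀ (cs : List (Int × Int)), cs.Pairwise (fun a b => a.1 < b.1) →
    (cs.foldl stepB none = none → cs = []) ∧
    (∀ c cd g, cs.foldl stepB none = some (c, cd, g) →
      PySem.List.min2? cs (fun it => it.2) (fun it => it.1) = some (c, cd) ∧
      (c, cd) ∈ cs ∧
      (∀ x ∈ cs, cd ≤ x.2) ∧
      (((cs.filter (fun nd => c < nd.1)).filter (fun nd => nd.2 < cd)).map
        (fun _ => (1 : Int))).sum = 0 ∧
      (((cs.filter (fun nd => c < nd.1)).filter (fun nd => cd ≤ nd.2)).map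
        (fun _ => (1 : Int))).sum = g) := by
  intro cs
  induction cs using List.reverseRecOn with
  | nil =>
    intro _
    exact ⟨fun _ => rfl, fun c cd g h => by simp at h⟩
  | append_singleton cs x ih =>
    intro hpw
    rw [List.pairwise_append] at hpw
    obtain ⟨hpw', _, hlast⟩ := hpw
    have hlast' : ∀ y ∈ cs, y.1 < x.1 := fun y hy => hlast y hy x (List.mem_singleton_self x)
    obtain ⟨ihn, ihs⟩ := ih hpw'
    rw [List.foldl_append]
    cases hacc : cs.foldl stepB none with
    | none =>
      have hnil : cs = [] := ihn hacc
      subst hnil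
      refine ⟨fun h => by simp [stepB] at h, ?_⟩
      intro c cd g heq
      simp only [List.foldl_cons, List.foldl_nil, stepB] at heq
      obtain ⟨rfl, rfl, rfl⟩ : x.1 = c ∧ x.2 = cd ∧ (0:Int) = g := by
        injection heq with h'
        exact ⟨congrArg Prod.fst h', congrArg (fun z => z.2.1) h', congrArg (fun z => z.2.2) h'⟩
      refine ⟨by simp [PySem.List.min2?], by simp, by simp, ?_, ?_⟩
      · simp [List.filter]
      · simp [List.filter]
    | some s =>
      rcases s with ⟨c, cd, g⟩
      obtain ⟨hmin, hmem, hbound, hlow, hge⟩ := ihs c cd g hacc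
      have hcx : c < x.1 := hlast' (c, cd) hmem
      constructor
      · intro h
        have h' : stepB (some (c, cd, g)) x = none := h
        rw [stepB.eq_def] at h'
        by_cases hx2 : x.2 < cd <;> simp [hx2] at h'
      · intro c' cd' g' heq
        rw [min2?_append_singleton, hmin]
        by_cases hx2 : x.2 < cd
        · have hstep : stepB (some (c, cd, g)) x = some (x.1, x.2, 0) := by
            rw [stepB.eq_def]; exact if_pos hx2
          have heq' : some (x.1, x.2, (0:Int)) = some (c', cd', g') := hstep ▸ heq
          obtain ⟨rfl, rfl, rfl⟩ : x.1 = c' ∧ x.2 = cd' ∧ (0:Int) = g' := by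
            injection heq' with h'
            exact ⟨congrArg Prod.fst h', congrArg (fun z => z.2.1) h', congrArg (fun z => z.2.2) h'⟩
          have hfilnil : (cs ++ [x]).filter (fun nd => x.1 < nd.1) = [] := by
            rw [List.filter_append, List.filter_eq_nil_iff.2, List.nil_append]
            · simp
            · intro y hy
              simp only [decide_eq_true_eq]
              have := hlast' y hy
              omega
          refine ⟨?_, ?_, ?_, ?_, ?_⟩
          · simp [hx2]
          · simp
          · intro y hy
            rcases List.mem_append.1 hy with hy' | hy'
            · have := hbound y hy'
              omega
            · rw [List.mem_singleton.1 hy']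
          · rw [hfilnil]; simp
          · rw [hfilnil]; simp
        · have hstep : stepB (some (c, cd, g)) x = some (c, cd, g + 1) := by
            rw [stepB.eq_def]; exact if_neg hx2
          have heq' : some (c, cd, g + 1) = some (c', cd', g') := hstep ▸ heq
          obtain ⟨rfl, rfl, rfl⟩ : c = c' ∧ cd = cd' ∧ g + 1 = g' := by
            injection heq' with h'
            exact ⟨congrArg Prod.fst h', congrArg (fun z => z.2.1) h', congrArg (fun z => z.2.2) h'⟩
          have hcxf : ¬ (x.1 < c) := by omega
          refine ⟨?_, ?_, ?_, ?_, ?_⟩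
          · simp [hx2, hcxf]
          · exact List.mem_append_left _ hmem
          · intro y hy
            rcases List.mem_append.1 hy with hy' | hy'
            · exact hbound y hy'
            · rw [List.mem_singleton.1 hy']; omega
          · rw [List.filter_append, List.filter_append, List.map_append, List.sum_append, hlow]
            simp [hcx, hx2]
          · rw [List.filter_append, List.filter_append, List.map_append, List.sum_append, hge]
            simp [hcx, not_lt.1 hx2]

-- ===== VERDICT (by name: the statement is the Claim_ definition above) =====
theorem chamber_carrier_spec : Claim_equal_chamber_carrier := by
  intro anchor_p offset _
  unfold Spec_chamber_carrier
  rw [chamber_carrier, chamber_carrier_alt]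
  rw [PySem.List.foldl_append_if (fun n => !pyIsPrime n) (fun n => (n, pyDivisorCount n))]
  rw [List.nil_append, bridge]
  set cs := ((PySem.List.pyRange (anchor_p + 1) (anchor_p + offset) 1).filter
    (fun n => !pyIsPrime n)).map (fun n => (n, pyDivisorCount n)) with hcs
  have hpw : cs.Pairwise (fun a b => a.1 < b.1) := by
    rw [hcs]
    exact List.Pairwise.map _ (fun a b h => h)
      ((PySem.List.pairwise_lt_pyRange_one _ _).filter _)
  cases hacc : cs.foldl stepB none with
  | none =>
    rw [(scan_spec cs hpw).1 hacc]
    simp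
  | some s =>
    rcases s with ⟨c, cd, g⟩
    obtain ⟨hmin, hmem, hbound, hlow, hge⟩ := (scan_spec cs hpw).2 c cd g hacc
    have hne : cs.isEmpty = false := by
      rcases cs with _ | _
      · simp at hacc
      · rfl
    rw [hne, hmin]
    simp only [Bool.false_eq_true, if_false, hlow, hge]
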